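-- pv_equiv track=rewrite | github.com/bouthilx/compute-forecast-framework | package/src/pdf_discovery/sources/hal_collector.py | _extract_pdf_url_from_identifiers
-- ===== SOURCE A (Python) =====
-- from typing import Optional, Dict, Any, List
--
-- def _extract_pdf_url_from_identifiers(identifiers: List[str]) -> Optional[str]:
--     """Extract PDF URL from HAL identifiers.
--
--     Args:
--         identifiers: List of identifiers
--
--     Returns:
--         PDF URL or None
--     """
--     if not identifiers:
--         return None
--
--     # Priority order: .pdf files, /file/, /document
--     for identifier in identifiers:
--         if identifier and identifier.endswith(".pdf"):
--             return identifier
--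
--     for identifier in identifiers:
--         if identifier and "/file/" in identifier:
--             return identifier
--
--     for identifier in identifiers:
--         if identifier and "/document" in identifier:
--             return identifier
--
--     return None
-- ===== SOURCE B (Python) =====
-- def _extract_pdf_url_from_identifiers(identifiers):
--     """Single pass: keep best URL by rank (1=.pdf early-return, 2=/file/, 3=/document)."""
--     best_url = None
--     best_rank = 4
--     for ident in identifiers:
--         if not ident:
--             continue
--         if ident.endswith(".pdf"):
--             return ident
--         r = 2 if "/file/" in ident else (3 if "/document" in ident else 4)
--         if r < best_rank:
--             best_url, best_rank = ident, r
--     return best_url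
-- ===== Notes on version B (the rewrite author's own statement) =====
-- stated objective: alternative
-- what changed: Replaces A's three sequential scans of the list (one per priority tier) with a single pass that maintains the best URL and its rank, returning immediately on a .pdf match.
import Mathlib
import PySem

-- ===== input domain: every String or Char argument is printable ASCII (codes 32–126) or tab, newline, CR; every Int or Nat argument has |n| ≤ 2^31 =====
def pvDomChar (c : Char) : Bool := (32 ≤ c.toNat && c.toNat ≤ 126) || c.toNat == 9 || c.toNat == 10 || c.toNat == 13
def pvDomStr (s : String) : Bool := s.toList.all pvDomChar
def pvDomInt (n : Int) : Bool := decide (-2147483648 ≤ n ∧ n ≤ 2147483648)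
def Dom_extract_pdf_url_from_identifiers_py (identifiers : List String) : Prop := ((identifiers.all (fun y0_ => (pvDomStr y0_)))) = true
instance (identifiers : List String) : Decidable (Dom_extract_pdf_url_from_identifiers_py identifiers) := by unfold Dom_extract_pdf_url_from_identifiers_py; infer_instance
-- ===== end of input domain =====

-- B replaces A's three sequential tier scans with a single pass keeping the best URL and rank (alternative decomposition, same cost).

-- ===== PORT A =====
-- A's three for-loops with early return are each a List.find? scan, in the same order.
def pvIsPdf (id : String) : Bool := !(id == "") && PySem.Str.endswith id ".pdf"
def pvIsFile (id : String) : Bool := !(id == "") && PySem.Str.isIn "/file/" id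
def pvIsDoc (id : String) : Bool := !(id == "") && PySem.Str.isIn "/document" id

def extract_pdf_url_from_identifiers_py (identifiers : List String) : Option String :=
  if identifiers = [] then none
  else
    match identifiers.find? pvIsPdf with
    | some id => some id
    | none =>
      match identifiers.find? pvIsFile with
      | some id => some id
      | none =>
        match identifiers.find? pvIsDoc with
        | some id => some id
        | none => none

-- ===== PORT B =====
-- single pass: best_url/best_rank accumulator, early return on a .pdf match (rank 1)
def pvAltLoop (identifiers : List String) (best_url : Option String) (best_rank : Nat) : Option String :=
  match identifiers with
  | [] => best_url
  | id :: rest =>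
    if id == "" then pvAltLoop rest best_url best_rank
    else if PySem.Str.endswith id ".pdf" then some id
    else
      let r : Nat := if PySem.Str.isIn "/file/" id then 2
                     else if PySem.Str.isIn "/document" id then 3 else 4
      if r < best_rank then pvAltLoop rest (some id) r
      else pvAltLoop rest best_url best_rank

def extract_pdf_url_from_identifiers_py_alt (identifiers : List String) : Option String :=
  pvAltLoop identifiers none 4

-- ===== PRECONDITION & SPEC =====
def Spec_extract_pdf_url_from_identifiers_py (identifiers : List String) (out : Option String) : Prop := out = extract_pdf_url_from_identifiers_py_alt identifiers
instance (identifiers : List String) (out : Option String) : Decidable (Spec_extract_pdf_url_from_identifiers_py identifiers out) := by unfold Spec_extract_pdf_url_from_identifiers_py; infer_instance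

-- ===== CLAIM (what is proved, stated in full; the proofs are below) =====
def Claim_equal_extract_pdf_url_from_identifiers_py : Prop := ∀ (identifiers : List String), Dom_extract_pdf_url_from_identifiers_py identifiers → Spec_extract_pdf_url_from_identifiers_py identifiers (extract_pdf_url_from_identifiers_py identifiers)

-- ===== LEMMAS AND PROOFS =====

-- the chained-scan value A computes on a (possibly empty) list
def pvChain (l : List String) : Option String :=
  (l.find? pvIsPdf).or ((l.find? pvIsFile).or (l.find? pvIsDoc))

set_option maxHeartbeats 1600000 in
lemma pvAltLoop_spec (l : List String) :
    pvAltLoop l none 4 = pvChain l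
    ∧ (∀ u, pvAltLoop l (some u) 2 = (l.find? pvIsPdf).or (some u))
    ∧ (∀ u, pvAltLoop l (some u) 3 = (l.find? pvIsPdf).or ((l.find? pvIsFile).or (some u))) := by
  induction l with
  | nil => simp [pvAltLoop, pvChain]
  | cons id rest ih =>
    obtain ⟨ih1, ih2, ih3⟩ := ih
    by_cases he : id = ""
    · subst he
      have hp : pvIsPdf "" = false := by decide
      have hf : pvIsFile "" = false := by decide
      have hd : pvIsDoc "" = false := by decide
      simp [pvAltLoop, pvChain, List.find?, hp, hf, hd, ih1, ih2, ih3, pvChain]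
    · have he' : (id == "") = false := by simp [he]
      by_cases hp : PySem.Chars.endswith id.toList ['.', 'p', 'd', 'f']
      · have h1 : pvIsPdf id = true := by simp [pvIsPdf, pysem, he', hp]
        simp [pvAltLoop, pvChain, List.find?, h1, pysem, he', hp]
      · have h1 : pvIsPdf id = false := by simp [pvIsPdf, pysem, hp]
        by_cases hf : PySem.Chars.isIn ['/', 'f', 'i', 'l', 'e', '/'] id.toList
        · have h2 : pvIsFile id = true := by simp [pvIsFile, pysem, he', hf]
          refine ⟨?_, ?_, ?_⟩ <;>
            simp [pvAltLoop, pvChain, List.find?, h1, h2, pysem, he', hp, hf, ih2]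
        · have h2 : pvIsFile id = false := by simp [pvIsFile, pysem, hf]
          by_cases hd : PySem.Chars.isIn ['/', 'd', 'o', 'c', 'u', 'm', 'e', 'n', 't'] id.toList
          · have h3 : pvIsDoc id = true := by simp [pvIsDoc, pysem, he', hd]
            refine ⟨?_, ?_, ?_⟩ <;>
              simp [pvAltLoop, pvChain, List.find?, h1, h2, h3, pysem, he', hp, hf, hd, ih2, ih3]
          · have h3 : pvIsDoc id = false := by simp [pvIsDoc, pysem, hd]
            refine ⟨?_, ?_, ?_⟩ <;>
              simp [pvAltLoop, pvChain, List.find?, h1, h2, h3, pysem, he', hp, hf, hd, ih1, ih2, ih3]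

-- ===== VERDICT (by name: the statement is the Claim_ definition above) =====
theorem extract_pdf_url_from_identifiers_py_spec : Claim_equal_extract_pdf_url_from_identifiers_py := by
  intro identifiers _
  unfold Spec_extract_pdf_url_from_identifiers_py
  unfold extract_pdf_url_from_identifiers_py extract_pdf_url_from_identifiers_py_alt
  rw [(pvAltLoop_spec identifiers).1]
  cases identifiers with
  | nil => simp [pvChain]
  | cons x rest =>
    simp only [reduceCtorEq, if_false, pvChain, Option.or]
    cases (x :: rest).find? pvIsPdf <;> cases (x :: rest).find? pvIsFile <;>
      cases (x :: rest).find? pvIsDoc <;> rfl
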